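-- pv_equiv track=rewrite | github.com/jamesk9526/NoxPrompter-ComfyUI-CustomNode | noxprompter/nodes/nox_prompt_narrative_weaver.py | _split_keywords
-- ===== SOURCE A (Python) =====
-- def _split_keywords(text):
--     if not text:
--         return []
--     separators = [",", "\n", ";"]
--     tokens = [text]
--     for sep in separators:
--         temp = []
--         for token in tokens:
--             temp.extend(token.split(sep))
--         tokens = temp
--     return [token.strip() for token in tokens if token.strip()]
-- ===== SOURCE B (Python) =====
-- def _split_keywords(text):
--     # One-pass character scan instead of three sequential split passes; same result.
--     if not text:
--         return []
--     tokens = []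
--     buf = []
--     for ch in text:
--         if ch in ",\n;":
--             tokens.append("".join(buf))
--             buf = []
--         else:
--             buf.append(ch)
--     tokens.append("".join(buf))
--     return [t.strip() for t in tokens if t.strip()]
-- ===== Notes on version B (the rewrite author's own statement) =====
-- stated objective: alternative
-- what changed: Replaces the three sequential split passes (each rebuilding the whole token list) by a single character-by-character scan that flushes the buffer at any of the three separators.
import Mathlib
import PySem

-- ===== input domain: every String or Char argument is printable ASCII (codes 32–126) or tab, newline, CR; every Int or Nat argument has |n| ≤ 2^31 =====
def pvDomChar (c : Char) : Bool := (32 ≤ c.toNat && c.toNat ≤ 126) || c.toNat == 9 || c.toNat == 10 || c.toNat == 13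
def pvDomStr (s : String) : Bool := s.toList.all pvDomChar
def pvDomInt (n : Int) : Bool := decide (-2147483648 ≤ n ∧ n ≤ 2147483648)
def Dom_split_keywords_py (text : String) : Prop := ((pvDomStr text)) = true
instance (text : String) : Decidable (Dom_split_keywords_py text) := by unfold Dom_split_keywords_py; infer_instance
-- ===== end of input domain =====

-- B replaces A's three sequential split passes by a single character scan; same return value everywhere.


-- ===== PORT A =====
-- token.split(sep): exact for the nonempty literal separators A uses (Str.split? is none only for sep = "")
def pySplit (token sep : String) : List String := (PySem.Str.split? token sep).getD []

def split_keywords_py (text : String) : List String :=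
  if text = "" then []
  else
    let separators := [",", "\n", ";"]
    let tokens := separators.foldl
      (fun tokens sep => tokens.foldl (fun temp token => temp ++ pySplit token sep) [])
      [text]
    (tokens.filter (fun token => !(PySem.Str.strip token == ""))).map PySem.Str.strip

-- ===== PORT B =====
def isSepChar (c : Char) : Bool := c == ',' || c == '\n' || c == ';'

-- B's for-loop over the characters: buffer + completed-token accumulator
def scanTokens : List Char → List Char → List (List Char) → List (List Char)
  | [], buf, acc => acc ++ [buf]
  | c :: rest, buf, acc =>
      if isSepChar c then scanTokens rest [] (acc ++ [buf])
      else scanTokens rest (buf ++ [c]) acc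

def split_keywords_py_alt (text : String) : List String :=
  if text = "" then []
  else
    let tokens := (scanTokens text.toList [] []).map String.ofList
    (tokens.filter (fun token => !(PySem.Str.strip token == ""))).map PySem.Str.strip

-- ===== PRECONDITION & SPEC =====
def Spec_split_keywords_py (text : String) (out : List String) : Prop := out = split_keywords_py_alt text
instance (text : String) (out : List String) : Decidable (Spec_split_keywords_py text out) := by unfold Spec_split_keywords_py; infer_instance

-- ===== CLAIM (what is proved, stated in full; the proofs are below) =====
def Claim_equal_split_keywords_py : Prop := ∀ (text : String), Dom_split_keywords_py text → Spec_split_keywords_py text (split_keywords_py text)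

-- ===== LEMMAS AND PROOFS =====

-- splitting on a predicate over characters, structurally
def pSplit (P : Char → Bool) : List Char → List (List Char)
  | [] => [[]]
  | a :: l => if P a then [] :: pSplit P l else (pSplit P l).modifyHead (a :: ·)

theorem pSplit_ne_nil (P : Char → Bool) (l : List Char) : pSplit P l ≠ [] := by
  cases l with
  | nil => simp [pSplit]
  | cons a l =>
    simp only [pSplit]
    split
    · simp
    · cases h : pSplit P l with
      | nil => exact absurd h (pSplit_ne_nil P l)
      | cons x t => simp

theorem modifyHead_append (f : List Char → List Char) (l l' : List (List Char)) (h : l ≠ []) :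
    (l ++ l').modifyHead f = l.modifyHead f ++ l' := by
  cases l with
  | nil => exact absurd rfl h
  | cons x t => simp

theorem modifyHead_comp (f g : List Char → List Char) (l : List (List Char)) :
    (l.modifyHead g).modifyHead f = l.modifyHead (fun x => f (g x)) := by
  cases l <;> simp

theorem splitOn_go_single (c : Char) :
    ∀ (fuel : Nat) (l cur : List Char) (acc : List (List Char)), l.length ≤ fuel →
      PySem.Chars.splitOn.go [c] fuel l cur acc
        = acc.reverse ++ (pSplit (· == c) l).modifyHead (cur.reverse ++ ·) := by
  intro fuel
  induction fuel with
  | zero =>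
    intro l cur acc h
    have hl : l = [] := List.length_eq_zero_iff.mp (Nat.le_zero.mp h)
    subst hl
    simp [PySem.Chars.splitOn.go, pSplit]
  | succ n ih =>
    intro l cur acc h
    cases l with
    | nil => simp [PySem.Chars.splitOn.go, pSplit]
    | cons a rest =>
      simp only [PySem.Chars.splitOn.go]
      by_cases hc : a = c
      · subst hc
        have : [a].isPrefixOf (a :: rest) = true := by simp [List.isPrefixOf]
        rw [if_pos this]
        rw [ih _ _ _ (by simpa using Nat.le_of_succ_le_succ h)]
        cases hps : pSplit (· == a) rest with
        | nil => exact absurd hps (pSplit_ne_nil _ _)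
        | cons x t => simp [pSplit, hps]
      · have : [c].isPrefixOf (a :: rest) = false := by
          simp [List.isPrefixOf]
          exact fun he => absurd he.symm hc
        rw [if_neg (by simp [this])]
        rw [ih _ _ _ (by simpa using Nat.le_of_succ_le_succ h)]
        have hP : ((· == c) a) = false := by simp [hc]
        simp only [pSplit, hP, Bool.false_eq_true, if_false]
        rw [modifyHead_comp]
        simp [List.append_assoc]

theorem splitOn_single (c : Char) (l : List Char) :
    PySem.Chars.splitOn l [c] = pSplit (· == c) l := by
  unfold PySem.Chars.splitOn
  rw [splitOn_go_single c (l.length + 1) l [] [] (Nat.le_succ _)]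
  cases h : pSplit (· == c) l with
  | nil => exact absurd h (pSplit_ne_nil _ _)
  | cons x t => simp

theorem pySplit_single (c : Char) (sep : String) (h : sep.toList = [c]) (token : String) :
    pySplit token sep = (pSplit (· == c) token.toList).map String.ofList := by
  unfold pySplit
  unfold PySem.Str.split? PySem.Chars.split?
  rw [h]
  simp [splitOn_single]

theorem pSplit_flatMap (P Q : Char → Bool) (l : List Char) :
    (pSplit P l).flatMap (pSplit Q) = pSplit (fun a => P a || Q a) l := by
  induction l with
  | nil => simp [pSplit]
  | cons a l ih =>
    by_cases hP : P a = true
    · simp [pSplit, hP, ih]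
    · have hP' : P a = false := by simpa using hP
      cases hps : pSplit P l with
      | nil => exact absurd hps (pSplit_ne_nil _ _)
      | cons x t =>
        rw [hps] at ih
        simp only [pSplit, hP', Bool.false_eq_true, if_false, hps, List.modifyHead_cons,
          List.flatMap_cons, Bool.false_or]
        by_cases hQ : Q a = true
        · simp only [hQ, if_true, ← ih, List.flatMap_cons]
          simp
        · have hQ' : Q a = false := by simpa using hQ
          simp only [hQ', Bool.false_eq_true, if_false, ← ih, List.flatMap_cons]
          rw [modifyHead_append _ _ _ (pSplit_ne_nil Q x)]

-- one elementary step of A's outer loop, turned into flatMap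
theorem step_eq_flatMap (tokens : List String) (sep : String) :
    tokens.foldl (fun temp token => temp ++ pySplit token sep) [] =
      tokens.flatMap (fun token => pySplit token sep) := by
  simpa using PySem.List.foldl_append_eq_flatMap (fun token => pySplit token sep) tokens []

theorem mapped_step (ls : List (List Char)) (c : Char) (sep : String) (h : sep.toList = [c]) :
    (ls.map String.ofList).flatMap (fun token => pySplit token sep) =
      (ls.flatMap (pSplit (· == c))).map String.ofList := by
  induction ls with
  | nil => simp
  | cons x t ih =>
    simp only [List.map_cons, List.flatMap_cons, ih]
    rw [pySplit_single c sep h]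
    simp

theorem scanTokens_eq (buf : List Char) (acc : List (List Char)) (cs : List Char) :
    scanTokens cs buf acc = acc ++ (pSplit isSepChar cs).modifyHead (buf ++ ·) := by
  induction cs generalizing buf acc with
  | nil => simp [scanTokens, pSplit]
  | cons a rest ih =>
    simp only [scanTokens]
    by_cases h : isSepChar a = true
    · rw [if_pos h, ih]
      cases hps : pSplit isSepChar rest with
      | nil => exact absurd hps (pSplit_ne_nil _ _)
      | cons x t => simp [pSplit, h, hps]
    · have h' : isSepChar a = false := by simpa using h
      rw [if_neg (by simp [h']), ih]
      simp only [pSplit, h', Bool.false_eq_true, if_false]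
      rw [modifyHead_comp]
      simp [List.append_assoc]

theorem a_tokens (text : String) :
    [",", "\n", ";"].foldl
      (fun tokens sep => tokens.foldl (fun temp token => temp ++ pySplit token sep) [])
      [text] = (pSplit isSepChar text.toList).map String.ofList := by
  simp only [List.foldl, step_eq_flatMap, List.nil_append]
  rw [pySplit_single ',' "," rfl, mapped_step _ '\n' "\n" rfl, pSplit_flatMap,
      mapped_step _ ';' ";" rfl, pSplit_flatMap]
  rfl

theorem b_tokens (text : String) :
    scanTokens text.toList [] [] = pSplit isSepChar text.toList := by
  rw [scanTokens_eq]
  cases h : pSplit isSepChar text.toList with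
  | nil => exact absurd h (pSplit_ne_nil _ _)
  | cons x t => simp

-- ===== VERDICT (by name: the statement is the Claim_ definition above) =====
theorem split_keywords_py_spec : Claim_equal_split_keywords_py := by
  intro text _
  unfold Spec_split_keywords_py split_keywords_py split_keywords_py_alt
  by_cases h : text = ""
  · simp [h]
  · rw [if_neg h, if_neg h]
    simp only [a_tokens, b_tokens]
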